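-- pv_equiv track=rewrite | github.com/MatheusFCarvalho/flask | verifiers/verifyRoteiro.py | verifyIfClientAlreadyExist
-- ===== SOURCE A (Python) =====
-- def verifyIfClientAlreadyExist(roteiro, pedido):
--         boolzin = False
--         for pedidoRota in roteiro['pedidos']:
--             if pedidoRota['cliente'] == pedido['cliente']:
--                 pedidoRota['pedidos'].append(pedido['pedidos'][0])
--                 boolzin = True
--
--         if boolzin == False:
--             roteiro['pedidos'].append(pedido)
--
--         return roteiro
-- ===== SOURCE B (Python) =====
-- def verifyIfClientAlreadyExist(roteiro, pedido):
--     antigos = roteiro['pedidos']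
--     if any(p['cliente'] == pedido['cliente'] for p in antigos):
--         novo = pedido['pedidos'][0]
--         roteiro['pedidos'] = [
--             {**p, 'pedidos': p['pedidos'] + [novo]} if p['cliente'] == pedido['cliente'] else p
--             for p in antigos
--         ]
--     else:
--         antigos.append(pedido)
--     return roteiro
-- ===== Notes on version B (the rewrite author's own statement) =====
-- stated objective: idiomatic
-- what changed: A's single mutate-scan with a boolean flag is replaced by an existence test (any) followed by a pure rebuild of the pedidos list via a conditional comprehension, with the append fallback on the else branch; equivalence is about the return value (A mutates matched entries in place, B rebuilds them).
import Mathlib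
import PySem

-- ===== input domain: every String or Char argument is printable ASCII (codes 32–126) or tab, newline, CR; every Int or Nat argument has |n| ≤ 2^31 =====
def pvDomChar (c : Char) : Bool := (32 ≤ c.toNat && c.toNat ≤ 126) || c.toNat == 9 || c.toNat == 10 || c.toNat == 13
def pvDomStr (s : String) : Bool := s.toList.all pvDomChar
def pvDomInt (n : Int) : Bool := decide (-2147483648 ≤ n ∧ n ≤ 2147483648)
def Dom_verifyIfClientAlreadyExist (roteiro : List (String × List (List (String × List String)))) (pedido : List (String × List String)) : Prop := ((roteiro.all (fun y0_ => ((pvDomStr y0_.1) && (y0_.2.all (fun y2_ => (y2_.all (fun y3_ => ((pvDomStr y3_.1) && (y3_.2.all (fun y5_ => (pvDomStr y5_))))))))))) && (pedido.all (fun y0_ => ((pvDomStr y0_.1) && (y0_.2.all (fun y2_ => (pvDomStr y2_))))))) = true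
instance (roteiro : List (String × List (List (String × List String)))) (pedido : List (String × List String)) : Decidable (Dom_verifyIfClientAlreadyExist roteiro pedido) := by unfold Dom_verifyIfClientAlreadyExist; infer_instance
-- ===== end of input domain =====

-- B replaces A's mutate-scan-with-flag by an `any` existence test plus a pure conditional-comprehension
-- rebuild of the pedidos list (idiomatic decomposition, same cost). Equivalence is about the RETURN value:
-- A mutates the matched dicts in place, B rebuilds them.


-- ===== PORT A =====
-- the for-loop over roteiro['pedidos']: threads boolzin, mutating each matching entry
-- (pedidoRota['pedidos'].append(…) ≙ Dict.insert, overwrite keeps position)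
def pvLoopA (cl : Option (List String)) (novo : String) :
    List (List (String × List String)) → Bool → List (List (String × List String)) × Bool
  | [], b => ([], b)
  | p :: rest, b =>
    if (PySem.Dict.mk p).get? "cliente" = cl then
      let tail := pvLoopA cl novo rest true
      (((PySem.Dict.mk p).insert "pedidos"
          ((PySem.Dict.mk p).getD "pedidos" [] ++ [novo])).items :: tail.1, tail.2)
    else
      let tail := pvLoopA cl novo rest b
      (p :: tail.1, tail.2)

def verifyIfClientAlreadyExist (roteiro : List (String × List (List (String × List String)))) (pedido : List (String × List String)) : List (String × List (List (String × List String))) :=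
  let L := (PySem.Dict.mk roteiro).getD "pedidos" []
  let cl := (PySem.Dict.mk pedido).get? "cliente"
  -- pedido['pedidos'][0] (total form; Pre_ guarantees key presence and nonemptiness when a match occurs)
  let novo := (PySem.List.pyGet? ((PySem.Dict.mk pedido).getD "pedidos" []) 0).getD ""
  let res := pvLoopA cl novo L false
  if res.2 = false then
    ((PySem.Dict.mk roteiro).insert "pedidos" (res.1 ++ [pedido])).items
  else
    ((PySem.Dict.mk roteiro).insert "pedidos" res.1).items

-- ===== PORT B =====
def verifyIfClientAlreadyExist_alt (roteiro : List (String × List (List (String × List String)))) (pedido : List (String × List String)) : List (String × List (List (String × List String))) :=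
  let antigos := (PySem.Dict.mk roteiro).getD "pedidos" []
  let cl := (PySem.Dict.mk pedido).get? "cliente"
  if antigos.any (fun p => decide ((PySem.Dict.mk p).get? "cliente" = cl)) then
    let novo := (PySem.List.pyGet? ((PySem.Dict.mk pedido).getD "pedidos" []) 0).getD ""
    ((PySem.Dict.mk roteiro).insert "pedidos"
      (antigos.map (fun p =>
        if (PySem.Dict.mk p).get? "cliente" = cl then
          -- {**p, 'pedidos': p['pedidos'] + [novo]}
          ((PySem.Dict.mk p).insert "pedidos"
            ((PySem.Dict.mk p).getD "pedidos" [] ++ [novo])).items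
        else p))).items
  else
    ((PySem.Dict.mk roteiro).insert "pedidos" (antigos ++ [pedido])).items

-- ===== PRECONDITION & SPEC =====
-- Pre_ is exactly where the Python A returns normally (roteiro has 'pedidos'; every entry — and, when the
-- entry list is nonempty, pedido — has 'cliente'; when some entry matches, pedido['pedidos'] exists and is
-- nonempty and every matching entry has 'pedidos'), plus: all key lists are duplicate-free — duplicate keys
-- cannot occur in a Python dict, so the assoc-list first-match semantics has no Python counterpart there.
def Pre_verifyIfClientAlreadyExist (roteiro : List (String × List (List (String × List String)))) (pedido : List (String × List String)) : Prop :=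
  let L := (PySem.Dict.mk roteiro).getD "pedidos" []
  (roteiro.map Prod.fst).Nodup ∧ (pedido.map Prod.fst).Nodup ∧
  (∀ p ∈ L, (p.map Prod.fst).Nodup) ∧
  (PySem.Dict.mk roteiro).contains "pedidos" = true ∧
  (L ≠ [] → (PySem.Dict.mk pedido).contains "cliente" = true) ∧
  (∀ p ∈ L, (PySem.Dict.mk p).contains "cliente" = true) ∧
  ((∃ p ∈ L, (PySem.Dict.mk p).get? "cliente" = (PySem.Dict.mk pedido).get? "cliente") →
    (PySem.Dict.mk pedido).contains "pedidos" = true ∧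
    (PySem.Dict.mk pedido).getD "pedidos" [] ≠ [] ∧
    (∀ p ∈ L, (PySem.Dict.mk p).get? "cliente" = (PySem.Dict.mk pedido).get? "cliente" →
      (PySem.Dict.mk p).contains "pedidos" = true))
instance (roteiro : List (String × List (List (String × List String)))) (pedido : List (String × List String)) : Decidable (Pre_verifyIfClientAlreadyExist roteiro pedido) := by unfold Pre_verifyIfClientAlreadyExist; infer_instance

def pvWitness_verifyIfClientAlreadyExist : (List (String × List (List (String × List String)))) × (List (String × List String)) :=
  ([("pedidos", [[("cliente", ["a"]), ("pedidos", ["x"])]])],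
   [("cliente", ["a"]), ("pedidos", ["y"])])

def Spec_verifyIfClientAlreadyExist (roteiro : List (String × List (List (String × List String)))) (pedido : List (String × List String)) (out : List (String × List (List (String × List String)))) : Prop := out = verifyIfClientAlreadyExist_alt roteiro pedido
instance (roteiro : List (String × List (List (String × List String)))) (pedido : List (String × List String)) (out : List (String × List (List (String × List String)))) : Decidable (Spec_verifyIfClientAlreadyExist roteiro pedido out) := by unfold Spec_verifyIfClientAlreadyExist; infer_instance

-- ===== CLAIM (what is proved, stated in full; the proofs are below) =====
def Claim_equal_verifyIfClientAlreadyExist : Prop := ∀ (roteiro : List (String × List (List (String × List String)))) (pedido : List (String × List String)), Dom_verifyIfClientAlreadyExist roteiro pedido → Pre_verifyIfClientAlreadyExist roteiro pedido → Spec_verifyIfClientAlreadyExist roteiro pedido (verifyIfClientAlreadyExist roteiro pedido)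

-- ===== LEMMAS AND PROOFS =====

-- A's loop = (conditional map of the entries, initial flag OR "some entry matches")
theorem pvLoopA_eq (cl : Option (List String)) (novo : String)
    (L : List (List (String × List String))) (b : Bool) :
    pvLoopA cl novo L b =
      (L.map (fun p =>
        if (PySem.Dict.mk p).get? "cliente" = cl then
          ((PySem.Dict.mk p).insert "pedidos"
            ((PySem.Dict.mk p).getD "pedidos" [] ++ [novo])).items
        else p),
       b || L.any (fun p => decide ((PySem.Dict.mk p).get? "cliente" = cl))) := by
  induction L generalizing b with
  | nil => simp [pvLoopA]
  | cons p rest ih =>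
    by_cases h : (PySem.Dict.mk p).get? "cliente" = cl <;>
      simp [pvLoopA, h, ih]

-- when no entry matches, the conditional map is the identity
theorem map_id_of_no_match (cl : Option (List String)) (novo : String)
    (L : List (List (String × List String)))
    (h : L.any (fun p => decide ((PySem.Dict.mk p).get? "cliente" = cl)) = false) :
    L.map (fun p =>
        if (PySem.Dict.mk p).get? "cliente" = cl then
          ((PySem.Dict.mk p).insert "pedidos"
            ((PySem.Dict.mk p).getD "pedidos" [] ++ [novo])).items
        else p) = L := by
  simp only [List.any_eq_false, decide_eq_true_eq] at h
  have : ∀ p ∈ L, (if (PySem.Dict.mk p).get? "cliente" = cl then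
          ((PySem.Dict.mk p).insert "pedidos"
            ((PySem.Dict.mk p).getD "pedidos" [] ++ [novo])).items
        else p) = p := by
    intro p hp
    simp [h p hp]
  simpa using List.map_congr_left this

-- ===== VERDICT (by name: the statement is the Claim_ definition above) =====
theorem verifyIfClientAlreadyExist_spec : Claim_equal_verifyIfClientAlreadyExist := by
  intro roteiro pedido _ _
  unfold Spec_verifyIfClientAlreadyExist verifyIfClientAlreadyExist verifyIfClientAlreadyExist_alt
  simp only [pvLoopA_eq, Bool.false_or]
  cases h : (((PySem.Dict.mk roteiro).getD "pedidos" []).any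
      (fun p => decide ((PySem.Dict.mk p).get? "cliente" = (PySem.Dict.mk pedido).get? "cliente"))) with
  | false => simp [map_id_of_no_match _ _ _ h]
  | true => simp
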